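-- pv_equiv track=rewrite | github.com/MowlanicaBilla/ML_projects | DSA_Practice/Leetcode/max_span.py | maxSpan
-- ===== SOURCE A (Python) =====
-- def maxSpan(input_list):
--     span_dict = {}
--     for i in range(len(input_list)):
--         if input_list[i] not in span_dict:
--             span_dict[input_list[i]] = [i, i]
--         else:
--             span_dict[input_list[i]][-1] = i
--
--     spans = [(L[1] - L[0] + 1) for L in span_dict.values()]
--     return max(spans)
-- ===== SOURCE B (Python) =====
-- def maxSpan(input_list):
--     rev = input_list[::-1]
--     n = len(input_list)
--     return max(n - rev.index(v) - input_list.index(v) for v in input_list)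
-- ===== Notes on version B (the rewrite author's own statement) =====
-- stated objective: alternative
-- what changed: B drops the per-value dictionary entirely: it reverses the list once and, for each element v, computes its span directly as n - rev.index(v) - input_list.index(v) (since last(v) = n-1-rev.index(v)), taking the max over all positions; A builds a value-keyed dict of [first,last] pairs in one pass and reduces over dict.values(). B trades A's O(n) hashing pass for dict-free quadratic index scans. Both raise ValueError on the empty list, which Pre_ excludes.
import Mathlib
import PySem

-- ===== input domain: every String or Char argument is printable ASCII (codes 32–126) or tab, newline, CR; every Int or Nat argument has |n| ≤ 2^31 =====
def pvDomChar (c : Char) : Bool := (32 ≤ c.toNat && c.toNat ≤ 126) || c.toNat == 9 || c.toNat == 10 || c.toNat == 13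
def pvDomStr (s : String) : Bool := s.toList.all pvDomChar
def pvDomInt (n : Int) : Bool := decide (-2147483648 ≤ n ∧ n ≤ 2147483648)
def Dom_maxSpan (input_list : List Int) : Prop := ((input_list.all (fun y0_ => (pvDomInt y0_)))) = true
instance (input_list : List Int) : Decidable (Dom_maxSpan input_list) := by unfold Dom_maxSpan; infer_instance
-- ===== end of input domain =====

-- B drops the dictionary: it reverses the list once and, for each element v, computes its span
-- as n - rev.index(v) - input_list.index(v), maximised over all positions (alternative, dict-free,
-- same result; B's index scans are quadratic where A's dict pass is linear).

-- ===== PORT A =====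
-- span_dict[v] is the Python two-element list [first, last], ported as a pair;
-- `span_dict[input_list[i]][-1] = i` is the overwrite d.insert v ((d.getD v _).1, i).
def maxSpan (input_list : List Int) : Int :=
  let span_dict : PySem.Dict Int (Int × Int) :=
    (PySem.List.pyRange 0 (PySem.List.len input_list) 1).foldl
      (fun d i =>
        let v := PySem.List.pyGetD input_list i 0
        d.insert v (if d.contains v then ((d.getD v (0, 0)).1, i) else (i, i)))
      PySem.Dict.empty
  let spans := span_dict.values.map (fun L => L.2 - L.1 + 1)
  match PySem.List.max? spans (fun x => x) with
  | some m => m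
  | none => 0   -- unreachable under Pre_: max([]) raises ValueError

-- ===== PORT B =====
-- rev.index(v) / input_list.index(v): v is drawn from input_list, so index? is always `some`
-- (Python's ValueError branch is unreachable); getD 0 discharges the Option.
def maxSpan_alt (input_list : List Int) : Int :=
  let rev := (PySem.List.slice? input_list none none (-1)).getD []
  let n : Int := PySem.List.len input_list
  let spans := input_list.map (fun v =>
    n - (((PySem.List.index? rev v).getD 0 : Nat) : Int)
      - (((PySem.List.index? input_list v).getD 0 : Nat) : Int))
  match PySem.List.max? spans (fun x => x) with
  | some m => m
  | none => 0   -- unreachable under Pre_: max of an empty generator raises ValueError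

-- ===== PRECONDITION & SPEC =====
-- A raises ValueError (max of an empty sequence) exactly on the empty list; so does B.
def Pre_maxSpan (input_list : List Int) : Prop := input_list ≠ []
instance (input_list : List Int) : Decidable (Pre_maxSpan input_list) := by
  unfold Pre_maxSpan; infer_instance
def pvWitness_maxSpan : List Int := [1, 2, 1, 3]

def Spec_maxSpan (input_list : List Int) (out : Int) : Prop := out = maxSpan_alt input_list
instance (input_list : List Int) (out : Int) : Decidable (Spec_maxSpan input_list out) := by
  unfold Spec_maxSpan; infer_instance

-- ===== CLAIM (what is proved, stated in full; the proofs are below) =====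
def Claim_equal_maxSpan : Prop := ∀ (input_list : List Int), Dom_maxSpan input_list →
  Pre_maxSpan input_list → Spec_maxSpan input_list (maxSpan input_list)

-- ===== LEMMAS AND PROOFS =====

-- A's dict-building loop, over enumerate
def stepA (d : PySem.Dict Int (Int × Int)) (p : Int × Int) : PySem.Dict Int (Int × Int) :=
  d.insert p.2 (if d.contains p.2 then ((d.getD p.2 (0, 0)).1, p.1) else (p.1, p.1))
def dictA (xs : List Int) : PySem.Dict Int (Int × Int) :=
  (PySem.List.enumerate xs 0).foldl stepA PySem.Dict.empty

-- first-occurrence index (0 if absent) and last-occurrence index (-1 if absent)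
def fidx (xs : List Int) (v : Int) : Int := (((PySem.List.index? xs v).getD 0 : Nat) : Int)
def lidx (xs : List Int) (v : Int) : Int :=
  (PySem.List.enumerate xs 0).foldl (fun a p => if p.2 = v then p.1 else a) (-1)

theorem enumerate_snoc (xs : List Int) (x : Int) :
    PySem.List.enumerate (xs ++ [x]) 0
      = PySem.List.enumerate xs 0 ++ [((xs.length : Int), x)] := by
  rw [PySem.List.enumerate_append]
  simp [PySem.List.enumerate_cons, PySem.List.enumerate_nil]

theorem lidx_snoc (xs : List Int) (x v : Int) :
    lidx (xs ++ [x]) v = if x = v then (xs.length : Int) else lidx xs v := by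
  unfold lidx
  rw [enumerate_snoc, List.foldl_append]
  simp

theorem dictA_snoc (xs : List Int) (x : Int) :
    dictA (xs ++ [x]) = stepA (dictA xs) ((xs.length : Int), x) := by
  unfold dictA
  rw [enumerate_snoc, List.foldl_append]
  rfl

theorem index?_snoc (xs : List Int) (x v : Int) :
    PySem.List.index? (xs ++ [x]) v =
      if v ∈ xs then PySem.List.index? xs v
      else if v = x then some xs.length else none := by
  by_cases hv : v ∈ xs
  · rw [PySem.List.index?_append_of_mem _ hv]
    simp [hv]
  · by_cases hvx : v = x
    · subst hvx
      rw [PySem.List.index?_append_singleton_self xs v hv]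
      simp [hv]
    · have hnot : v ∉ xs ++ [x] := by simp [hv, hvx]
      rw [(PySem.List.index?_eq_none_iff _ v).mpr hnot]
      simp [hv, hvx]

theorem invA (xs : List Int) (v : Int) :
    (dictA xs).get? v
      = (PySem.List.index? xs v).map (fun k => ((k : Int), lidx xs v)) := by
  induction xs using List.reverseRecOn generalizing v with
  | nil =>
      rw [(PySem.List.index?_eq_none_iff [] v).mpr (List.not_mem_nil)]
      simp [dictA, PySem.List.enumerate_nil, PySem.Dict.get?_empty]
  | append_singleton xs x ih =>
      rw [dictA_snoc, index?_snoc]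
      have hcont : (dictA xs).contains x = decide (x ∈ xs) := by
        rw [PySem.Dict.contains_eq_isSome_get?, ih]
        by_cases hx : x ∈ xs
        · obtain ⟨k, hk⟩ := Option.isSome_iff_exists.mp
            ((PySem.List.index?_isSome_iff xs x).mpr hx)
          rw [hk]; simp [hx]
        · rw [(PySem.List.index?_eq_none_iff xs x).mpr hx]; simp [hx]
      simp only [stepA, hcont]
      rw [PySem.Dict.get?_insert]
      by_cases hvx : v = x
      · subst hvx
        have hl : lidx (xs ++ [v]) v = (xs.length : Int) := by simp [lidx_snoc]
        simp only [if_true, hl]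
        by_cases hx : v ∈ xs
        · obtain ⟨k, hk⟩ := Option.isSome_iff_exists.mp
            ((PySem.List.index?_isSome_iff xs v).mpr hx)
          have hgetD : (dictA xs).getD v (0, 0) = ((k : Int), lidx xs v) := by
            rw [PySem.Dict.getD_eq_get?_getD, ih, hk]; rfl
          simp only [hx, decide_true, if_true, hk, hgetD]
          rfl
        · simp [hx]
      · have hl : lidx (xs ++ [x]) v = lidx xs v := by
          rw [lidx_snoc, if_neg (fun h => hvx (Eq.symm h))]
        simp only [hvx, if_false, hl]
        rw [ih]
        by_cases hv : v ∈ xs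
        · simp [hv]
        · rw [(PySem.List.index?_eq_none_iff xs v).mpr hv]
          simp [hv]

theorem containsA (xs : List Int) (v : Int) :
    (dictA xs).contains v = decide (v ∈ xs) := by
  rw [PySem.Dict.contains_eq_isSome_get?, invA]
  by_cases hv : v ∈ xs
  · obtain ⟨k, hk⟩ := Option.isSome_iff_exists.mp
      ((PySem.List.index?_isSome_iff xs v).mpr hv)
    rw [hk]; simp [hv]
  · rw [(PySem.List.index?_eq_none_iff xs v).mpr hv]; simp [hv]

theorem keysA (xs : List Int) : (dictA xs).keys = PySem.Set.ofList xs := by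
  induction xs using List.reverseRecOn with
  | nil => simp [dictA, PySem.List.enumerate_nil, PySem.Dict.keys_empty]
  | append_singleton xs x ih =>
      rw [dictA_snoc, PySem.Set.ofList_append_singleton]
      show ((dictA xs).insert x _).keys = _
      by_cases hx : x ∈ xs
      · rw [PySem.Dict.keys_insert_of_contains _ _ (by rw [containsA]; simp [hx]),
          ih, PySem.Set.add_of_mem ((PySem.Set.mem_ofList xs x).mpr hx)]
      · rw [PySem.Dict.keys_insert_of_not_contains _ _ (by rw [containsA]; simp [hx]),
          ih, PySem.Set.add_of_not_mem (fun h => hx ((PySem.Set.mem_ofList xs x).mp h))]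

theorem nodupA (xs : List Int) : (dictA xs).keys.Nodup := by
  rw [keysA]; exact PySem.Set.nodup_ofList xs

theorem spansA (xs : List Int) :
    (dictA xs).values.map (fun L => L.2 - L.1 + 1)
      = (PySem.Set.ofList xs).map (fun v => lidx xs v - fidx xs v + 1) := by
  rw [PySem.Dict.values_eq_map_keys _ (nodupA xs) (0, 0), keysA, List.map_map]
  refine List.map_congr_left (fun v hv => ?_)
  have hvx : v ∈ xs := (PySem.Set.mem_ofList xs v).mp hv
  obtain ⟨k, hk⟩ := Option.isSome_iff_exists.mp
    ((PySem.List.index?_isSome_iff xs v).mpr hvx)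
  have : (dictA xs).getD v (0, 0) = ((k : Int), lidx xs v) := by
    rw [PySem.Dict.getD_eq_get?_getD, invA, hk]; rfl
  simp only [Function.comp_apply, this, fidx, hk, Option.getD_some]

-- the last index of v in xs, through the first index of v in the reversed list
theorem lidx_rev (xs : List Int) (v : Int) (hv : v ∈ xs) :
    ∃ k : Nat, PySem.List.index? xs.reverse v = some k ∧
      lidx xs v = (xs.length : Int) - 1 - (k : Int) := by
  induction xs using List.reverseRecOn with
  | nil => simp at hv
  | append_singleton xs x ih =>
      rw [List.reverse_append, lidx_snoc]
      by_cases hx : x = v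
      · subst hx
        refine ⟨0, ?_, ?_⟩
        · simpa using PySem.List.index?_cons_self x xs.reverse
        · simp
      · have hv' : v ∈ xs := by
          rcases List.mem_append.mp hv with h | h
          · exact h
          · simp at h; exact absurd h.symm hx
        obtain ⟨k, hk, hl⟩ := ih hv'
        refine ⟨k + 1, ?_, ?_⟩
        · have h := PySem.List.index?_cons_of_ne (x := x) (v := v) xs.reverse hx
          simp only [List.reverse_singleton, List.singleton_append]
          rw [h, hk]; rfl
        · simp only [hx, if_false, hl]
          push_cast
          simp
          ring

-- max(L1) = max(L2) when each list is bounded by a member of the other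
theorem max_cross (L1 L2 : List Int)
    (h12 : ∀ a ∈ L1, ∃ b ∈ L2, a ≤ b) (h21 : ∀ b ∈ L2, ∃ a ∈ L1, b ≤ a) :
    PySem.List.max? L1 (fun x => x) = PySem.List.max? L2 (fun x => x) := by
  cases h1 : PySem.List.max? L1 (fun x => x) with
  | none =>
      have hL1 : L1 = [] := (PySem.List.max?_eq_none_iff L1 _).mp h1
      subst hL1
      have hL2 : L2 = [] := by
        cases L2 with
        | nil => rfl
        | cons b t =>
            obtain ⟨a, ha, _⟩ := h21 b (by simp)
            exact absurd ha (List.not_mem_nil)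
      simp [hL2, (PySem.List.max?_eq_none_iff ([] : List Int) (fun x => x)).mpr rfl]
  | some m1 =>
      cases h2 : PySem.List.max? L2 (fun x => x) with
      | none =>
          have hL2 : L2 = [] := (PySem.List.max?_eq_none_iff L2 _).mp h2
          subst hL2
          obtain ⟨b, hb, _⟩ := h12 m1 (PySem.List.max?_mem h1)
          exact absurd hb (List.not_mem_nil)
      | some m2 =>
          obtain ⟨b, hb, hab⟩ := h12 m1 (PySem.List.max?_mem h1)
          obtain ⟨a, ha, hba⟩ := h21 m2 (PySem.List.max?_mem h2)
          have h1le : m1 ≤ m2 := le_trans hab (PySem.List.max?_isMax h2 b hb)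
          have h2le : m2 ≤ m1 := le_trans hba (PySem.List.max?_isMax h1 a ha)
          rw [le_antisymm h1le h2le]

-- B's per-element span formula agrees with A's per-value span at every v ∈ xs
theorem span_eq (xs : List Int) (v : Int) (hv : v ∈ xs) :
    (PySem.List.len xs : Int)
        - (((PySem.List.index? xs.reverse v).getD 0 : Nat) : Int)
        - (((PySem.List.index? xs v).getD 0 : Nat) : Int)
      = lidx xs v - fidx xs v + 1 := by
  obtain ⟨k, hk, hl⟩ := lidx_rev xs v hv
  rw [hk, hl]
  unfold fidx
  simp [PySem.List.len]
  ring

theorem maxSpan_spec : Claim_equal_maxSpan := by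
  intro xs _ _
  unfold Spec_maxSpan
  have hA : maxSpan xs
      = (match PySem.List.max?
          ((PySem.Set.ofList xs).map (fun v => lidx xs v - fidx xs v + 1))
          (fun x => x) with
        | some m => m
        | none => 0) := by
    rw [← spansA]
    unfold maxSpan dictA
    rw [PySem.List.enumerate_eq_map_pyRange xs 0, List.foldl_map]
    rfl
  have hB : maxSpan_alt xs
      = (match PySem.List.max?
          (xs.map (fun v =>
            (PySem.List.len xs : Int)
              - (((PySem.List.index? xs.reverse v).getD 0 : Nat) : Int)
              - (((PySem.List.index? xs v).getD 0 : Nat) : Int)))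
          (fun x => x) with
        | some m => m
        | none => 0) := by
    unfold maxSpan_alt
    rw [PySem.List.slice?_none_none_neg_one]
    rfl
  rw [hA, hB, max_cross _ _ ?h12 ?h21]
  case h12 =>
    intro a ha
    obtain ⟨v, hv, rfl⟩ := List.mem_map.mp ha
    have hvx : v ∈ xs := (PySem.Set.mem_ofList xs v).mp hv
    exact ⟨_, List.mem_map.mpr ⟨v, hvx, rfl⟩, le_of_eq (span_eq xs v hvx).symm⟩
  case h21 =>
    intro b hb
    obtain ⟨v, hv, rfl⟩ := List.mem_map.mp hb
    exact ⟨_, List.mem_map.mpr ⟨v, (PySem.Set.mem_ofList xs v).mpr hv, rfl⟩,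
      le_of_eq (span_eq xs v hv)⟩
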